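-- pv_equiv track=rewrite | github.com/intenebris/python_course | seminar_5/seminar_5_2.py | change_grades
-- ===== SOURCE A (Python) =====
-- def change_grades(lst):
--     if 4 in lst:
--         lst[lst.index(4)] = 1
--         return change_grades(lst)
--     elif 5 in lst:
--         lst[lst.index(5)] = 1
--         return change_grades(lst)
--     else:
--         return lst
-- ===== SOURCE B (Python) =====
-- def change_grades(lst):
--     for i, x in enumerate(lst):
--         if x == 4 or x == 5:
--             lst[i] = 1
--     return lst
-- ===== Notes on version B (the rewrite author's own statement) =====
-- stated objective: simpler
-- what changed: Replaces A's recursion that rescans the list with 'in'/'.index' after every single replacement by one linear in-place pass that rewrites each 4 or 5 to 1.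
import Mathlib
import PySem

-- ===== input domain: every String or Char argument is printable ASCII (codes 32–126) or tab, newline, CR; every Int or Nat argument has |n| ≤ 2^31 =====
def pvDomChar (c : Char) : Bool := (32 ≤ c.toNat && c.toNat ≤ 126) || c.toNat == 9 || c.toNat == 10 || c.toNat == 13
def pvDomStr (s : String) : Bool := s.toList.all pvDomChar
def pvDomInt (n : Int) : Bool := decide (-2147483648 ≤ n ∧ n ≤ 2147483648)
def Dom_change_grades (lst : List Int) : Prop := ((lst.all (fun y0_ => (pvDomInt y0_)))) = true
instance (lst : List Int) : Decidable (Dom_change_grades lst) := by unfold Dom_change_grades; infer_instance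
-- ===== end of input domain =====

-- B replaces A's recursion, which rescans the list with `in`/`.index` after every single replacement,
-- by one linear in-place pass; both mutate the argument list in Python, the equivalence proved is about the return value.


-- termination helper for the port of A: replacing the first 4 (resp. 5) by 1 lowers count 4 + count 5
theorem pvCountSetLt (l : List Int) (i : Nat) (h : i < l.length) (h4 : l[i] = 4 ∨ l[i] = 5) :
    (l.set i 1).count 4 + (l.set i 1).count 5 < l.count 4 + l.count 5 := by
  have hc : 0 < l.count l[i] := List.count_pos_iff.mpr (List.getElem_mem h)
  rcases h4 with h4 | h4 <;> rw [h4] at hc <;>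
    simp [List.count_set h, h4] <;> exact List.count_pos_iff.mp hc

-- ===== PORT A =====
-- `lst.index(v)` is ported with PySem.List.index?; inside each branch membership guarantees `some`.
def change_grades (lst : List Int) : List Int :=
  if h4 : (4 : Int) ∈ lst then
    change_grades (lst.set ((PySem.List.index? lst 4).getD 0) 1)
  else if h5 : (5 : Int) ∈ lst then
    change_grades (lst.set ((PySem.List.index? lst 5).getD 0) 1)
  else
    lst
termination_by lst.count 4 + lst.count 5
decreasing_by
  · obtain ⟨k, hk⟩ := Option.isSome_iff_exists.mp ((PySem.List.index?_isSome_iff lst 4).mpr h4)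
    obtain ⟨hlt, hv, -⟩ := PySem.List.getElem_of_index?_eq_some hk
    rw [hk]; exact pvCountSetLt lst k hlt (Or.inl hv)
  · obtain ⟨k, hk⟩ := Option.isSome_iff_exists.mp ((PySem.List.index?_isSome_iff lst 5).mpr h5)
    obtain ⟨hlt, hv, -⟩ := PySem.List.getElem_of_index?_eq_some hk
    rw [hk]; exact pvCountSetLt lst k hlt (Or.inr hv)

-- ===== PORT B =====
-- single pass: each element equal to 4 or 5 becomes 1
def change_grades_alt (lst : List Int) : List Int :=
  match lst with
  | [] => []
  | x :: xs => (if x == 4 || x == 5 then 1 else x) :: change_grades_alt xs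

-- ===== PRECONDITION & SPEC =====
def Spec_change_grades (lst : List Int) (out : List Int) : Prop := out = change_grades_alt lst
instance (lst : List Int) (out : List Int) : Decidable (Spec_change_grades lst out) := by unfold Spec_change_grades; infer_instance

-- ===== CLAIM (what is proved, stated in full; the proofs are below) =====
def Claim_equal_change_grades : Prop := ∀ (lst : List Int), Dom_change_grades lst → Spec_change_grades lst (change_grades lst)

-- ===== LEMMAS AND PROOFS =====

theorem alt_eq_map (lst : List Int) :
    change_grades_alt lst = lst.map (fun x => if x == 4 || x == 5 then 1 else x) := by
  induction lst with
  | nil => rfl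
  | cons x xs ih => simp [change_grades_alt, ih]

-- setting a position holding 4 or 5 to 1 does not change B's result
theorem alt_set (lst : List Int) (i : Nat) (h : i < lst.length) (h4 : lst[i] = 4 ∨ lst[i] = 5) :
    change_grades_alt (lst.set i 1) = change_grades_alt lst := by
  rw [alt_eq_map, alt_eq_map, List.map_set]
  have hlen : i < (lst.map (fun x => if x == 4 || x == 5 then 1 else x)).length := by simpa using h
  have hval : (lst.map (fun x => if x == 4 || x == 5 then 1 else x))[i]'hlen = 1 := by
    rw [List.getElem_map]; rcases h4 with h4 | h4 <;> simp [h4]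
  have hs := List.set_getElem_self hlen
  rw [hval] at hs
  rw [ite_self]
  exact hs

theorem a_eq_b (lst : List Int) : change_grades lst = change_grades_alt lst := by
  induction lst using change_grades.induct with
  | case1 lst h4 ih =>
    obtain ⟨k, hk⟩ := Option.isSome_iff_exists.mp ((PySem.List.index?_isSome_iff lst 4).mpr h4)
    obtain ⟨hlt, hv, -⟩ := PySem.List.getElem_of_index?_eq_some hk
    rw [change_grades]
    simp only [h4, dif_pos]
    rw [ih, hk]
    exact alt_set lst k hlt (Or.inl hv)
  | case2 lst h4 h5 ih =>
    obtain ⟨k, hk⟩ := Option.isSome_iff_exists.mp ((PySem.List.index?_isSome_iff lst 5).mpr h5)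
    obtain ⟨hlt, hv, -⟩ := PySem.List.getElem_of_index?_eq_some hk
    rw [change_grades]
    simp only [h4, h5, dif_neg, dif_pos, not_false_iff]
    rw [ih, hk]
    exact alt_set lst k hlt (Or.inr hv)
  | case3 lst h4 h5 =>
    rw [change_grades]
    simp only [h4, h5, dif_neg, not_false_iff]
    rw [alt_eq_map]
    conv_lhs => rw [← List.map_id' lst]
    apply List.map_congr_left
    intro x hx
    have : x ≠ 4 := fun e => h4 (e ▸ hx)
    have : x ≠ 5 := fun e => h5 (e ▸ hx)
    simp_all

-- ===== VERDICT (by name: the statement is the Claim_ definition above) =====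
theorem change_grades_spec : Claim_equal_change_grades := by
  intro lst _
  exact a_eq_b lst
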